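-- pv_equiv track=rewrite | github.com/choutaLAN/galactic-crafting-googlesheets | scripts/updateGoogleSheetTest.py | calculate_needed_ingredients
-- ===== SOURCE A (Python) =====
-- def calculate_needed_ingredients(player_ingredients, all_full_ingredients, parsed_crafting_data, mint_to_name):
--     needed_ingredients = {}
--     decomposed_ingredients = {}
--
--     # Initial calculation of needed ingredients
--     for ingredient, required_qty in all_full_ingredients.items():
--         player_qty = player_ingredients.get(ingredient, 0)
--         needed_qty = max(required_qty - player_qty, 0)
--         if needed_qty > 0:
--             needed_ingredients[ingredient] = needed_qty
--
--     # Recursive function to decompose ingredients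
--     def decompose(item_name, quantity_needed, player_ingredients, decomposed_ingredients, parsed_crafting_data, mint_to_name):
--         if item_name in parsed_crafting_data:
--             item_data = parsed_crafting_data[item_name]
--             if 'ingredients' in item_data:
--                 for ingredient_dict in item_data['ingredients']:
--                     component_mint = ingredient_dict['mint']
--                     component_name = mint_to_name.get(component_mint, "Unknown Ingredient")
--                     if component_name == "Unknown Ingredient":
--                         continue
--
--                     component_qty = int(ingredient_dict['amount'])
--                     total_component_needed = component_qty * quantity_needed
--                     player_component_qty = player_ingredients.get(component_name, 0)
--
--                     used_qty = min(total_component_needed, player_component_qty)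
--                     player_ingredients[component_name] = max(player_component_qty - used_qty, 0)  # Safely deduct
--                     total_component_needed -= used_qty
--
--                     if total_component_needed > 0:
--                         decomposed_ingredients[component_name] = decomposed_ingredients.get(component_name, 0) + total_component_needed
--                         decompose(component_name, total_component_needed, player_ingredients, decomposed_ingredients, parsed_crafting_data, mint_to_name)
--
--     # Decompose each needed ingredient
--     for item_name in list(needed_ingredients):
--         quantity_needed = needed_ingredients[item_name]
--         if quantity_needed > 0:
--             decompose(item_name, quantity_needed, player_ingredients.copy(), decomposed_ingredients, parsed_crafting_data, mint_to_name)
--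
--     # Replace initial calculations with decomposed quantities
--     for ingredient, decomposed_qty in decomposed_ingredients.items():
--         needed_ingredients[ingredient] = decomposed_qty
--
--     return needed_ingredients
-- ===== SOURCE B (Python) =====
-- def calculate_needed_ingredients(player_ingredients, all_full_ingredients, parsed_crafting_data, mint_to_name):
--     # Iterative re-implementation: the recursive decompose is replaced by an
--     # explicit DFS stack of (ingredient_dict, quantity) tasks; children are
--     # pushed in reverse so pops reproduce the deduct-then-descend pre-order.
--     needed_ingredients = {}
--     for ingredient, required_qty in all_full_ingredients.items():
--         needed_qty = max(required_qty - player_ingredients.get(ingredient, 0), 0)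
--         if needed_qty > 0:
--             needed_ingredients[ingredient] = needed_qty
--
--     def children(name):
--         data = parsed_crafting_data.get(name)
--         return data.get('ingredients', []) if data is not None else []
--
--     decomposed_ingredients = {}
--     for item_name in list(needed_ingredients):
--         quantity_needed = needed_ingredients[item_name]
--         if quantity_needed <= 0:
--             continue
--         player = player_ingredients.copy()
--         stack = [(d, quantity_needed) for d in reversed(children(item_name))]
--         while stack:
--             ingredient_dict, qty = stack.pop()
--             component_name = mint_to_name.get(ingredient_dict['mint'], "Unknown Ingredient")
--             if component_name == "Unknown Ingredient":
--                 continue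
--             total = int(ingredient_dict['amount']) * qty
--             have = player.get(component_name, 0)
--             used = min(total, have)
--             player[component_name] = max(have - used, 0)
--             total -= used
--             if total > 0:
--                 decomposed_ingredients[component_name] = decomposed_ingredients.get(component_name, 0) + total
--                 for c in reversed(children(component_name)):
--                     stack.append((c, total))
--
--     for ingredient, decomposed_qty in decomposed_ingredients.items():
--         needed_ingredients[ingredient] = decomposed_qty
--     return needed_ingredients
-- ===== Notes on version B (the rewrite author's own statement) =====
-- stated objective: alternative
-- what changed: The recursive decompose is replaced by an explicit iterative DFS over a single stack of (ingredient-dict, quantity) tasks, with each processed component's children pushed on top so the deduct-then-descend pre-order and per-root player-copy deductions are reproduced exactly.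
import Mathlib
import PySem

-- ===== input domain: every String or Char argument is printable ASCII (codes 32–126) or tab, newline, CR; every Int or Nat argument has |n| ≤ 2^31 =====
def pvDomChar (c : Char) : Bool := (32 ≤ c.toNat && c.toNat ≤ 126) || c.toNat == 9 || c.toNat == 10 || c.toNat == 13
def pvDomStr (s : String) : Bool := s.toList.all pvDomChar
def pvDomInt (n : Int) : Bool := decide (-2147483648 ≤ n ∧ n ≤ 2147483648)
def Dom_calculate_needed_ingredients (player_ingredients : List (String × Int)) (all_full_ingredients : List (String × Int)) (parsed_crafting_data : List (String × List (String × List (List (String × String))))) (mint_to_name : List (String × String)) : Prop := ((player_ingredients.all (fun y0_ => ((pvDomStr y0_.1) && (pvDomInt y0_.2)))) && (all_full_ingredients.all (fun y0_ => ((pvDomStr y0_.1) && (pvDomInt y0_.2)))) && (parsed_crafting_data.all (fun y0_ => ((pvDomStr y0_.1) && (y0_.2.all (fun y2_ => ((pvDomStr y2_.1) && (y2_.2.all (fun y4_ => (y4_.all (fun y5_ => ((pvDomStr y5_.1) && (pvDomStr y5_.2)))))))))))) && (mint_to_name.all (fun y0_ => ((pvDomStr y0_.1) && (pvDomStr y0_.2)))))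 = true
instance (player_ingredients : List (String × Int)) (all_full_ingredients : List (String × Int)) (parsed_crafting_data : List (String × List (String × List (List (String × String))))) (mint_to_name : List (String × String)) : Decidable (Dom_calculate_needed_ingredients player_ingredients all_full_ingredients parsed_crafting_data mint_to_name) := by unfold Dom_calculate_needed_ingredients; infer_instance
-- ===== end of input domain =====

-- B replaces the recursive `decompose` with an explicit DFS stack of (ingredient-dict, quantity) tasks
-- (pushed so that the deduct-then-descend pre-order of A is preserved); objective: alternative.
-- The Nat fuel in both ports is a totalization artifact (Python's recursion/while-loop has none); the two
-- fuels align by construction, and under Pre_ (acyclic crafting data) neither ever runs out.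

-- marshalling of the dict-typed arguments (the type-convention boundary, shared by both ports)
def pvDataDict (parsed : List (String × List (String × List (List (String × String))))) :
    PySem.Dict String (PySem.Dict String (List (PySem.Dict String String))) :=
  PySem.Dict.ofList (parsed.map (fun p => (p.1, PySem.Dict.ofList (p.2.map (fun q => (q.1, q.2.map PySem.Dict.ofList))))))

-- ===== PORT A =====
mutual
-- decompose(item_name, quantity_needed, …): the fuel totalizes the recursion (decremented once per call).
-- Where Python raises (KeyError on 'mint'/'amount', ValueError in int()) — outside Pre_ — the entry is skipped.
def pvDecomposeA (dataD : PySem.Dict String (PySem.Dict String (List (PySem.Dict String String))))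
    (m2nD : PySem.Dict String String) :
    Nat → String → Int → (PySem.Dict String Int × PySem.Dict String Int) →
      (PySem.Dict String Int × PySem.Dict String Int)
  | 0, _, _, st => st
  | f + 1, item, qty, st =>
    match dataD.get? item with
    | none => st
    | some idata =>
      match idata.get? "ingredients" with
      | none => st
      | some ings => pvLoopA dataD m2nD f ings qty st
  termination_by f _ _ _ => (f, 0)

-- the `for ingredient_dict in item_data['ingredients']` loop of decompose
def pvLoopA (dataD : PySem.Dict String (PySem.Dict String (List (PySem.Dict String String))))
    (m2nD : PySem.Dict String String) :
    Nat → List (PySem.Dict String String) → Int → (PySem.Dict String Int × PySem.Dict String Int) →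
      (PySem.Dict String Int × PySem.Dict String Int)
  | _, [], _, st => st
  | f, d :: ds, qty, st =>
    match d.get? "mint" with
    | none => pvLoopA dataD m2nD f ds qty st  -- Python: KeyError (outside Pre_)
    | some mint =>
      let name := m2nD.getD mint "Unknown Ingredient"
      if name == "Unknown Ingredient" then pvLoopA dataD m2nD f ds qty st
      else
        match (d.get? "amount").bind PySem.Int.ofStr? with
        | none => pvLoopA dataD m2nD f ds qty st  -- Python: KeyError/ValueError (outside Pre_)
        | some cq =>
          let total := cq * qty
          let pq := st.1.getD name 0
          let used := min total pq
          let st1 := (st.1.insert name (max (pq - used) 0), st.2)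
          let total' := total - used
          if total' > 0 then
            let st2 := (st1.1, st1.2.insert name (st1.2.getD name 0 + total'))
            pvLoopA dataD m2nD f ds qty (pvDecomposeA dataD m2nD f name total' st2)
          else pvLoopA dataD m2nD f ds qty st1
  termination_by f ings _ _ => (f, ings.length + 1)
end

def calculate_needed_ingredients (player_ingredients : List (String × Int)) (all_full_ingredients : List (String × Int)) (parsed_crafting_data : List (String × List (String × List (List (String × String))))) (mint_to_name : List (String × String)) : List (String × Int) :=
  let playerD := PySem.Dict.ofList player_ingredients
  let fullD := PySem.Dict.ofList all_full_ingredients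
  let dataD := pvDataDict parsed_crafting_data
  let m2nD := PySem.Dict.ofList mint_to_name
  let needed := fullD.items.foldl (fun nd p =>
      let needed_qty := max (p.2 - playerD.getD p.1 0) 0
      if needed_qty > 0 then nd.insert p.1 needed_qty else nd) PySem.Dict.empty
  let decomposed := needed.keys.foldl (fun dec item_name =>
      let quantity_needed := needed.getD item_name 0
      if quantity_needed > 0 then
        (pvDecomposeA dataD m2nD (parsed_crafting_data.length + 2) item_name quantity_needed (playerD, dec)).2
      else dec) PySem.Dict.empty
  (decomposed.items.foldl (fun nd p => nd.insert p.1 p.2) needed).items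

-- ===== PORT B =====
-- children(name) of Source B
def pvChildrenB (dataD : PySem.Dict String (PySem.Dict String (List (PySem.Dict String String)))) (name : String) :
    List (PySem.Dict String String) :=
  match dataD.get? name with
  | none => []
  | some d => (d.get? "ingredients").getD []

-- termination-measure helper only (not part of Source B): the largest ingredient list in the crafting data
def pvMaxBranch (dataD : PySem.Dict String (PySem.Dict String (List (PySem.Dict String String)))) : Nat :=
  (dataD.items.map (fun p => ((p.2.get? "ingredients").getD []).length)).foldr max 0

lemma pv_le_foldr_max (l : List Nat) (x : Nat) (h : x ∈ l) : x ≤ l.foldr max 0 := by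
  induction l with
  | nil => cases h
  | cons a t ih =>
    rcases List.mem_cons.1 h with rfl | h
    · exact le_max_left _ _
    · exact le_trans (ih h) (le_max_right _ _)

lemma pvChildrenB_length_le (dataD : PySem.Dict String (PySem.Dict String (List (PySem.Dict String String))))
    (name : String) : (pvChildrenB dataD name).length ≤ pvMaxBranch dataD := by
  unfold pvChildrenB
  cases h : dataD.get? name with
  | none => exact Nat.zero_le _
  | some d =>
    have hm : (name, d) ∈ dataD.items := PySem.Dict.mem_items_of_get?_eq_some _ h
    exact pv_le_foldr_max _ _ (List.mem_map.2 ⟨(name, d), hm, rfl⟩)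


-- termination-measure arithmetic for pvRunB: pushing the children of `nm` costs less than one unit of parent fuel
lemma pvPush_lt (dataD : PySem.Dict String (PySem.Dict String (List (PySem.Dict String String))))
    (nm : String) (t' : Int) (fc' : Nat) :
    (List.map ((fun t : (PySem.Dict String String) × Int × Nat => (pvMaxBranch dataD + 1) ^ t.2.2) ∘
        fun c => (c, t', fc')) (pvChildrenB dataD nm)).sum < (pvMaxBranch dataD + 1) ^ (fc' + 1) := by
  have hlen : (pvChildrenB dataD nm).length ≤ pvMaxBranch dataD := pvChildrenB_length_le dataD nm
  have hsum : (List.map ((fun t : (PySem.Dict String String) × Int × Nat => (pvMaxBranch dataD + 1) ^ t.2.2) ∘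
      fun c => (c, t', fc')) (pvChildrenB dataD nm)).sum
      = (pvChildrenB dataD nm).length * (pvMaxBranch dataD + 1) ^ fc' := by
    simp [Function.comp_def, List.map_const']
  rw [hsum, pow_succ, Nat.mul_comm _ (pvMaxBranch dataD + 1)]
  have hx : 0 < (pvMaxBranch dataD + 1) ^ fc' := pow_pos (Nat.succ_pos _) _
  calc (pvChildrenB dataD nm).length * (pvMaxBranch dataD + 1) ^ fc'
      ≤ pvMaxBranch dataD * (pvMaxBranch dataD + 1) ^ fc' := Nat.mul_le_mul_right _ hlen
    _ < (pvMaxBranch dataD + 1) * (pvMaxBranch dataD + 1) ^ fc' := by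
        exact Nat.mul_lt_mul_of_lt_of_le (Nat.lt_succ_self _) (le_refl _) hx

-- the `while stack:` loop of Source B; head of the list = top of the stack (Python appends reversed(children)
-- and pops from the end, which is the same stack as prepending the children in order). The Nat on each
-- task is the totalization fuel; where Python raises (outside Pre_) the task is skipped.
def pvRunB (dataD : PySem.Dict String (PySem.Dict String (List (PySem.Dict String String))))
    (m2nD : PySem.Dict String String) :
    List ((PySem.Dict String String) × Int × Nat) → (PySem.Dict String Int × PySem.Dict String Int) →
      (PySem.Dict String Int × PySem.Dict String Int)
  | [], st => st
  | (d, qty, fc) :: rest, st =>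
    match d.get? "mint" with
    | none => pvRunB dataD m2nD rest st  -- Python: KeyError (outside Pre_)
    | some mint =>
      let name := m2nD.getD mint "Unknown Ingredient"
      if name == "Unknown Ingredient" then pvRunB dataD m2nD rest st
      else
        match (d.get? "amount").bind PySem.Int.ofStr? with
        | none => pvRunB dataD m2nD rest st  -- Python: KeyError/ValueError (outside Pre_)
        | some cq =>
          let total := cq * qty
          let pq := st.1.getD name 0
          let used := min total pq
          let st1 := (st.1.insert name (max (pq - used) 0), st.2)
          let total' := total - used
          if total' > 0 then
            let st2 := (st1.1, st1.2.insert name (st1.2.getD name 0 + total'))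
            match fc with
            | 0 => pvRunB dataD m2nD rest st2  -- fuel exhausted: push nothing (unreachable under Pre_)
            | fc' + 1 => pvRunB dataD m2nD ((pvChildrenB dataD name).map (fun c => (c, total', fc')) ++ rest) st2
          else pvRunB dataD m2nD rest st1
  termination_by ts _ => (ts.map (fun t => (pvMaxBranch dataD + 1) ^ t.2.2)).sum
  decreasing_by
  all_goals simp only [List.map_cons, List.sum_cons, List.map_append, List.sum_append, List.map_map]
  all_goals first
    | exact Nat.lt_add_of_pos_left (pow_pos (Nat.succ_pos _) _)
    | exact Nat.add_lt_add_right (pvPush_lt _ _ _ _) _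

def calculate_needed_ingredients_alt (player_ingredients : List (String × Int)) (all_full_ingredients : List (String × Int)) (parsed_crafting_data : List (String × List (String × List (List (String × String))))) (mint_to_name : List (String × String)) : List (String × Int) :=
  let playerD := PySem.Dict.ofList player_ingredients
  let fullD := PySem.Dict.ofList all_full_ingredients
  let dataD := pvDataDict parsed_crafting_data
  let m2nD := PySem.Dict.ofList mint_to_name
  let needed := fullD.items.foldl (fun nd p =>
      let needed_qty := max (p.2 - playerD.getD p.1 0) 0
      if needed_qty > 0 then nd.insert p.1 needed_qty else nd) PySem.Dict.empty
  let decomposed := needed.keys.foldl (fun dec item_name =>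
      let quantity_needed := needed.getD item_name 0
      if quantity_needed ≤ 0 then dec
      else (pvRunB dataD m2nD
              ((pvChildrenB dataD item_name).map (fun c => (c, quantity_needed, parsed_crafting_data.length + 1)))
              (playerD, dec)).2) PySem.Dict.empty
  (decomposed.items.foldl (fun nd p => nd.insert p.1 p.2) needed).items

-- ===== PRECONDITION & SPEC =====
-- helpers for Pre_ (conditions on the input data graph; they never run either port's algorithm)
def pvKnown (m2nD : PySem.Dict String String) (d : PySem.Dict String String) : Option String :=
  (d.get? "mint").bind (fun m =>
    let n := m2nD.getD m "Unknown Ingredient"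
    if n == "Unknown Ingredient" then none else some n)

def pvWF (m2nD : PySem.Dict String String) (d : PySem.Dict String String) : Bool :=
  d.contains "mint" &&
    (match pvKnown m2nD d with
     | none => true
     | some _ =>
       match d.get? "amount" with
       | none => false
       | some a => (PySem.Int.ofStr? a).isSome)

def pvSuccs (dataD : PySem.Dict String (PySem.Dict String (List (PySem.Dict String String))))
    (m2nD : PySem.Dict String String) (u : String) : List String :=
  (pvChildrenB dataD u).filterMap (fun d =>
    (pvKnown m2nD d).bind (fun n => if dataD.contains n then some n else none))

def pvReach (dataD : PySem.Dict String (PySem.Dict String (List (PySem.Dict String String))))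
    (m2nD : PySem.Dict String String) (k : Nat) (S : List String) : List String :=
  (fun T => (T ++ T.flatMap (pvSuccs dataD m2nD)).dedup)^[k] S

-- Pre_ = exactly the inputs on which Python A returns normally, approximated from above on the INPUT data:
-- every ingredient dict of a crafting entry reachable from the initially-needed items has a 'mint' key and,
-- when its mint names a known ingredient, an int()-parsable 'amount'; and the reachable part of the
-- crafting graph is acyclic (on a reachable cycle A's recursion would not terminate / hit RecursionError).
-- This excludes some inputs on which A returns (malformed or cyclic entries that A never actually visits
-- because every path to them dies out with nothing needed); see claim.json "cites".
def Pre_calculate_needed_ingredients (player_ingredients : List (String × Int)) (all_full_ingredients : List (String × Int)) (parsed_crafting_data : List (String × List (String × List (List (String × String))))) (mint_to_name : List (String × String)) : Prop :=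
  let playerD := PySem.Dict.ofList player_ingredients
  let fullD := PySem.Dict.ofList all_full_ingredients
  let dataD := pvDataDict parsed_crafting_data
  let m2nD := PySem.Dict.ofList mint_to_name
  let roots := fullD.items.filterMap (fun p =>
      if 0 < max (p.2 - playerD.getD p.1 0) 0 ∧ dataD.contains p.1 = true then some p.1 else none)
  let R := pvReach dataD m2nD (parsed_crafting_data.length + 1) roots
  (∀ u ∈ R, ∀ d ∈ pvChildrenB dataD u, pvWF m2nD d = true) ∧
  (∀ u ∈ R, u ∉ pvReach dataD m2nD (parsed_crafting_data.length + 1) (pvSuccs dataD m2nD u))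
instance (player_ingredients : List (String × Int)) (all_full_ingredients : List (String × Int)) (parsed_crafting_data : List (String × List (String × List (List (String × String))))) (mint_to_name : List (String × String)) : Decidable (Pre_calculate_needed_ingredients player_ingredients all_full_ingredients parsed_crafting_data mint_to_name) := by unfold Pre_calculate_needed_ingredients; infer_instance

def pvWitness_calculate_needed_ingredients : (List (String × Int)) × (List (String × Int)) × (List (String × List (String × List (List (String × String))))) × (List (String × String)) :=
  ([("a", 1)], [("x", 3)], [("x", [("ingredients", [[("mint", "m1"), ("amount", "2")]])])], [("m1", "a")])

def Spec_calculate_needed_ingredients (player_ingredients : List (String × Int)) (all_full_ingredients : List (String × Int)) (parsed_crafting_data : List (String × List (String × List (List (String × String))))) (mint_to_name : List (String × String)) (out : List (String × Int)) : Prop := out = calculate_needed_ingredients_alt player_ingredients all_full_ingredients parsed_crafting_data mint_to_name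
instance (player_ingredients : List (String × Int)) (all_full_ingredients : List (String × Int)) (parsed_crafting_data : List (String × List (String × List (List (String × String))))) (mint_to_name : List (String × String)) (out : List (String × Int)) : Decidable (Spec_calculate_needed_ingredients player_ingredients all_full_ingredients parsed_crafting_data mint_to_name out) := by unfold Spec_calculate_needed_ingredients; infer_instance

-- ===== CLAIM (what is proved, stated in full; the proofs are below) =====
def Claim_equal_calculate_needed_ingredients : Prop := ∀ (player_ingredients : List (String × Int)) (all_full_ingredients : List (String × Int)) (parsed_crafting_data : List (String × List (String × List (List (String × String))))) (mint_to_name : List (String × String)), Dom_calculate_needed_ingredients player_ingredients all_full_ingredients parsed_crafting_data mint_to_name → Pre_calculate_needed_ingredients player_ingredients all_full_ingredients parsed_crafting_data mint_to_name → Spec_calculate_needed_ingredients player_ingredients all_full_ingredients parsed_crafting_data mint_to_name (calculate_needed_ingredients player_ingredients all_full_ingredients parsed_crafting_data mint_to_name)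

-- ===== LEMMAS AND PROOFS =====

@[simp] lemma pvRunB_nil (dataD : PySem.Dict String (PySem.Dict String (List (PySem.Dict String String))))
    (m2nD : PySem.Dict String String) (st : PySem.Dict String Int × PySem.Dict String Int) :
    pvRunB dataD m2nD [] st = st := by simp [pvRunB]

@[simp] lemma pvLoopA_nil (dataD : PySem.Dict String (PySem.Dict String (List (PySem.Dict String String))))
    (m2nD : PySem.Dict String String) (f : Nat) (qty : Int) (st : PySem.Dict String Int × PySem.Dict String Int) :
    pvLoopA dataD m2nD f [] qty st = st := by simp [pvLoopA]

@[simp] lemma pvDecomposeA_zero (dataD : PySem.Dict String (PySem.Dict String (List (PySem.Dict String String))))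
    (m2nD : PySem.Dict String String) (name : String) (q : Int) (st : PySem.Dict String Int × PySem.Dict String Int) :
    pvDecomposeA dataD m2nD 0 name q st = st := by simp [pvDecomposeA]

-- A's decompose at positive fuel is exactly its ingredient loop over the children list of Source B
lemma pvDecomposeA_succ (dataD : PySem.Dict String (PySem.Dict String (List (PySem.Dict String String))))
    (m2nD : PySem.Dict String String) (f : Nat) (name : String) (q : Int)
    (st : PySem.Dict String Int × PySem.Dict String Int) :
    pvDecomposeA dataD m2nD (f + 1) name q st = pvLoopA dataD m2nD f (pvChildrenB dataD name) q st := by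
  simp only [pvDecomposeA, pvChildrenB]
  cases h : dataD.get? name with
  | none => simp
  | some idata =>
    cases h2 : idata.get? "ingredients" with
    | none => simp [h2]
    | some ings => simp [h2]

-- the stack machine simulates one `for`-loop level of the recursion: running the tasks of `ings`
-- (all at fuel f) on top of `rest` first performs exactly pvLoopA on `ings`, then continues with `rest`.
lemma pvRunB_simulates (dataD : PySem.Dict String (PySem.Dict String (List (PySem.Dict String String))))
    (m2nD : PySem.Dict String String) :
    ∀ (f : Nat) (ings : List (PySem.Dict String String)) (qty : Int)
      (st : PySem.Dict String Int × PySem.Dict String Int) (rest : List ((PySem.Dict String String) × Int × Nat)),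
      pvRunB dataD m2nD (ings.map (fun d => (d, qty, f)) ++ rest) st
        = pvRunB dataD m2nD rest (pvLoopA dataD m2nD f ings qty st) := by
  intro f
  induction f using Nat.strong_induction_on with
  | _ f IH =>
  intro ings qty st rest
  induction ings generalizing st rest with
  | nil => simp
  | cons d ds ih =>
    simp only [List.map_cons, List.cons_append]
    simp only [pvRunB, pvLoopA]
    cases hm : d.get? "mint" with
    | none => simpa using ih st rest
    | some mint =>
      by_cases hn : (m2nD.getD mint "Unknown Ingredient") == "Unknown Ingredient"
      · simp only [hn, if_pos]
        exact ih st rest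
      · simp only [hn, ite_false, Bool.false_eq_true]
        cases ha : (d.get? "amount").bind PySem.Int.ofStr? with
        | none => simpa using ih st rest
        | some cq =>
          by_cases ht : cq * qty - min (cq * qty) (st.1.getD (m2nD.getD mint "Unknown Ingredient") 0) > 0
          · simp only [ht, if_pos]
            cases f with
            | zero =>
              dsimp only
              simp only [pvDecomposeA_zero]
              exact ih _ rest
            | succ f' =>
              dsimp only
              rw [IH f' (Nat.lt_succ_self f') (pvChildrenB dataD (m2nD.getD mint "Unknown Ingredient")) _ _ _]
              rw [pvDecomposeA_succ]
              exact ih _ rest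
          · simp only [ht, ite_false]
            exact ih _ rest

-- one root: starting B's stack from the children of `item` at fuel K+1 is A's decompose at fuel K+2
lemma pvRoot_eq (dataD : PySem.Dict String (PySem.Dict String (List (PySem.Dict String String))))
    (m2nD : PySem.Dict String String) (K : Nat) (item : String) (qty : Int)
    (st : PySem.Dict String Int × PySem.Dict String Int) :
    pvDecomposeA dataD m2nD (K + 2) item qty st
      = pvRunB dataD m2nD ((pvChildrenB dataD item).map (fun c => (c, qty, K + 1))) st := by
  have h := pvRunB_simulates dataD m2nD (K + 1) (pvChildrenB dataD item) qty st []
  rw [List.append_nil] at h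
  rw [h, pvRunB_nil, pvDecomposeA_succ]

lemma pv_main (player_ingredients : List (String × Int)) (all_full_ingredients : List (String × Int))
    (parsed_crafting_data : List (String × List (String × List (List (String × String)))))
    (mint_to_name : List (String × String)) :
    calculate_needed_ingredients player_ingredients all_full_ingredients parsed_crafting_data mint_to_name
      = calculate_needed_ingredients_alt player_ingredients all_full_ingredients parsed_crafting_data mint_to_name := by
  unfold calculate_needed_ingredients calculate_needed_ingredients_alt
  dsimp only
  set playerD := PySem.Dict.ofList player_ingredients
  set fullD := PySem.Dict.ofList all_full_ingredients
  set dataD := pvDataDict parsed_crafting_data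
  set m2nD := PySem.Dict.ofList mint_to_name
  set needed := fullD.items.foldl (fun nd p =>
      let needed_qty := max (p.2 - playerD.getD p.1 0) 0
      if needed_qty > 0 then nd.insert p.1 needed_qty else nd) PySem.Dict.empty with hneeded
  have hdec : needed.keys.foldl (fun dec item_name =>
        let quantity_needed := needed.getD item_name 0
        if quantity_needed > 0 then
          (pvDecomposeA dataD m2nD (parsed_crafting_data.length + 2) item_name quantity_needed (playerD, dec)).2
        else dec) PySem.Dict.empty
      = needed.keys.foldl (fun dec item_name =>
        let quantity_needed := needed.getD item_name 0
        if quantity_needed ≤ 0 then dec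
        else (pvRunB dataD m2nD
                ((pvChildrenB dataD item_name).map (fun c => (c, quantity_needed, parsed_crafting_data.length + 1)))
                (playerD, dec)).2) PySem.Dict.empty := by
    apply List.foldl_ext
    intro dec item_name _
    dsimp only
    by_cases hq : needed.getD item_name 0 > 0
    · rw [if_pos hq, if_neg (by omega), pvRoot_eq]
    · rw [if_neg hq, if_pos (by omega)]
  rw [hdec]

-- ===== VERDICT (by name: the statement is the Claim_ definition above) =====
theorem calculate_needed_ingredients_spec : Claim_equal_calculate_needed_ingredients := by
  intro player_ingredients all_full_ingredients parsed_crafting_data mint_to_name _ _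
  unfold Spec_calculate_needed_ingredients
  exact pv_main player_ingredients all_full_ingredients parsed_crafting_data mint_to_name
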